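-- pv_equiv track=rewrite | github.com/TheGigaChat/Python-challenges | EXAM/exam00/exam.py | rainbows
-- ===== SOURCE A (Python) =====
-- def rainbows(field: str) -> int:
--     """
--     Count rainbows recursively.
--
--     :param field: string to search rainbows from
--     :return: number of valid rainbows in the string
--     """
--     field = field.lower()
--
--     # Define the rainbow patterns
--     forward_rainbow = "rainbow"
--     backward_rainbow = "wobniar"
--
--     # Base case: If the field is shorter than a rainbow, return 0
--     if len(field) < len(forward_rainbow):
--         return 0
--
--     # Check if the beginning of the string matches a forward or backward rainbow
--     if field.startswith(forward_rainbow) or field.startswith(backward_rainbow):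
--         # Remove the matched rainbow and recurse
--         return 1 + rainbows(field[len(forward_rainbow):])
--
--     # Recurse by removing the first character and checking the rest of the string
--     return rainbows(field[1:])
-- ===== SOURCE B (Python) =====
-- def rainbows(field: str) -> int:
--     """Count non-overlapping rainbows with a single linear index scan."""
--     s = field.lower()
--     n = len(s)
--     count = 0
--     i = 0
--     while i + 7 <= n:
--         chunk = s[i:i + 7]
--         if chunk == "rainbow" or chunk == "wobniar":
--             count += 1
--             i += 7
--         else:
--             i += 1
--     return count
-- ===== Notes on version B (the rewrite author's own statement) =====
-- stated objective: faster
-- what changed: Replaced the recursion that slices and re-lowercases the string at every step with one lowercase pass followed by an iterative index-pointer scan (advance 7 on a match, else 1), so no intermediate strings are built.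
import Mathlib
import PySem

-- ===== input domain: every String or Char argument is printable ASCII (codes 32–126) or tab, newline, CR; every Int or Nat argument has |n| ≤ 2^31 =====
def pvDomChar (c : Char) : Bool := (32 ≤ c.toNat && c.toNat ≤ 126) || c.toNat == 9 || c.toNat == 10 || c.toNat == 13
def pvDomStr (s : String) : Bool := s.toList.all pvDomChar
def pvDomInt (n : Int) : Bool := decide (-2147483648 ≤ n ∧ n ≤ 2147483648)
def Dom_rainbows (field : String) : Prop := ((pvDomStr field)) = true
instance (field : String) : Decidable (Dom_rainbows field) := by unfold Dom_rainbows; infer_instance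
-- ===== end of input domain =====

-- B replaces A's recursion (which re-lowercases and slices the string at every call) by one
-- lowercase pass followed by an iterative index-pointer scan; the return value is proved equal.

-- ===== PORT A =====
-- the two pattern constants, as code-point lists
def pvForward : List Char := ['r', 'a', 'i', 'n', 'b', 'o', 'w']
def pvBackward : List Char := ['w', 'o', 'b', 'n', 'i', 'a', 'r']

-- slice/length facts cited by the ports' termination proofs
theorem pvSliceFrom7 (xs : List Char) : PySem.List.slice xs (some (7:Int)) none = xs.drop 7 := by
  simpa using PySem.List.slice_from_natCast (xs := xs) (a := 7)
theorem pvSliceFrom1 (xs : List Char) : PySem.List.slice xs (some (1:Int)) none = xs.drop 1 := by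
  simpa using PySem.List.slice_from_natCast (xs := xs) (a := 1)
theorem pvLower_length (l : List Char) : (PySem.Chars.lower l).length = l.length := by
  simp [PySem.Chars.lower]

-- A's recursive body on code-point lists; `field = field.lower()` is re-applied on every call
-- (the rebound `field` is written inline at each of its uses), `field[7:]` / `field[1:]` are
-- PySem slices; the two ifs and the two startswith tests stay in A's order
def rainbowsGo (f0 : List Char) : Int :=
  if (PySem.Chars.lower f0).length < 7 then 0
  else if PySem.Chars.startswith (PySem.Chars.lower f0) pvForward ||
          PySem.Chars.startswith (PySem.Chars.lower f0) pvBackward then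
    1 + rainbowsGo (PySem.List.slice (PySem.Chars.lower f0) (some (7 : Int)) none)
  else
    rainbowsGo (PySem.List.slice (PySem.Chars.lower f0) (some (1 : Int)) none)
termination_by f0.length
decreasing_by
  all_goals (simp only [pvSliceFrom7, pvSliceFrom1, List.length_drop, pvLower_length] at *; omega)

def rainbows (field : String) : Int := rainbowsGo field.toList

-- ===== PORT B =====
-- B's while-loop: index pointer i, counter count; the chunk s[i:i+7] is the PySem slice
def altLoop (s : List Char) (n i : Nat) (count : Int) : Int :=
  if i + 7 ≤ n then
    if PySem.List.slice s (some (i : Int)) (some ((i : Int) + 7)) = pvForward ∨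
       PySem.List.slice s (some (i : Int)) (some ((i : Int) + 7)) = pvBackward then
      altLoop s n (i + 7) (count + 1)
    else
      altLoop s n (i + 1) count
  else count
termination_by n - i

-- s = field.lower(); n = len(s); then the scan from i = 0, count = 0
def rainbows_alt (field : String) : Int :=
  altLoop (PySem.Chars.lower field.toList) (PySem.Chars.lower field.toList).length 0 0

-- ===== PRECONDITION & SPEC =====
def Spec_rainbows (field : String) (out : Int) : Prop := out = rainbows_alt field
instance (field : String) (out : Int) : Decidable (Spec_rainbows field out) := by unfold Spec_rainbows; infer_instance

-- ===== CLAIM (what is proved, stated in full; the proofs are below) =====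
def Claim_equal_rainbows : Prop := ∀ (field : String), Dom_rainbows field → Spec_rainbows field (rainbows field)

-- ===== LEMMAS AND PROOFS =====

-- greedy rainbow count of an ALREADY-lowercased list: the common mathematical core of both ports
def pvCnt (l : List Char) : Int :=
  if l.length < 7 then 0
  else if l.take 7 = pvForward ∨ l.take 7 = pvBackward then 1 + pvCnt (l.drop 7)
  else pvCnt l.tail
termination_by l.length
decreasing_by
  · simp only [List.length_drop]; omega
  · simp only [List.length_tail]; omega

theorem pvIsupper_iff (c : Char) :
    PySem.Chars.isupper c = true ↔ 65 ≤ c.toNat ∧ c.toNat ≤ 90 := by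
  simp only [PySem.Chars.isupper, Bool.and_eq_true, decide_eq_true_eq, Char.le_def,
    UInt32.le_iff_toNat_le]
  rfl

theorem pvLowerChar_idem (c : Char) :
    PySem.Chars.lowerChar (PySem.Chars.lowerChar c) = PySem.Chars.lowerChar c := by
  unfold PySem.Chars.lowerChar
  by_cases h1 : PySem.Chars.isupper c = true
  · rw [if_pos h1]
    obtain ⟨hl, hu⟩ := (pvIsupper_iff c).mp h1
    have ht : (Char.ofNat (c.toNat + 32)).toNat = c.toNat + 32 := by
      rw [Char.ofNat, dif_pos (Or.inl (by omega : c.toNat + 32 < 55296))]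
      rfl
    rw [if_neg (by rw [pvIsupper_iff, ht]; omega)]
  · rw [if_neg h1, if_neg h1]

theorem pvLower_idem (l : List Char) :
    PySem.Chars.lower (PySem.Chars.lower l) = PySem.Chars.lower l := by
  simp [PySem.Chars.lower, List.map_map, Function.comp_def, pvLowerChar_idem]

theorem pvLower_drop (l : List Char) (k : Nat) :
    PySem.Chars.lower (l.drop k) = (PySem.Chars.lower l).drop k := by
  simp [PySem.Chars.lower, List.map_drop]

-- A's startswith test is exactly pvCnt's take-7 test
theorem pvMatch_iff (g : List Char) :
    (PySem.Chars.startswith g pvForward || PySem.Chars.startswith g pvBackward) = true ↔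
    (g.take 7 = pvForward ∨ g.take 7 = pvBackward) := by
  rw [Bool.or_eq_true, PySem.Chars.startswith_iff, PySem.Chars.startswith_iff,
    List.prefix_iff_eq_take, List.prefix_iff_eq_take]
  constructor <;> rintro (h | h) <;> simp_all [pvForward, pvBackward]

-- A's recursion computes pvCnt of the lowered list (the re-lowering collapses by idempotence)
theorem rainbowsGo_eq_cnt (f0 : List Char) :
    rainbowsGo f0 = pvCnt (PySem.Chars.lower f0) := by
  induction hn : f0.length using Nat.strong_induction_on generalizing f0 with
  | _ n ih =>
  subst hn
  rw [rainbowsGo, pvCnt, pvSliceFrom7, pvSliceFrom1]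
  by_cases h1 : (PySem.Chars.lower f0).length < 7
  · rw [if_pos h1, if_pos h1]
  · rw [if_neg h1, if_neg h1]
    by_cases h2 : ((PySem.Chars.lower f0).take 7 = pvForward ∨
                   (PySem.Chars.lower f0).take 7 = pvBackward)
    · rw [if_pos ((pvMatch_iff _).mpr h2), if_pos h2,
        ih ((PySem.Chars.lower f0).drop 7).length
          (by rw [pvLower_length] at h1; simp only [List.length_drop, pvLower_length]; omega)
          ((PySem.Chars.lower f0).drop 7) rfl,
        pvLower_drop, pvLower_idem]
    · rw [if_neg (fun h => h2 ((pvMatch_iff _).mp h)), if_neg h2,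
        ih ((PySem.Chars.lower f0).drop 1).length
          (by rw [pvLower_length] at h1; simp only [List.length_drop, pvLower_length]; omega)
          ((PySem.Chars.lower f0).drop 1) rfl,
        pvLower_drop, pvLower_idem, List.drop_one]

-- B's loop computes count + pvCnt of the still-unscanned suffix
theorem altLoop_eq_cnt (s : List Char) (i : Nat) (count : Int) :
    altLoop s s.length i count = count + pvCnt (s.drop i) := by
  induction hn : s.length - i using Nat.strong_induction_on generalizing i count with
  | _ n ih =>
  subst hn
  rw [altLoop, pvCnt]
  have hchunk : PySem.List.slice s (some (i : Int)) (some ((i : Int) + 7)) =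
      (s.drop i).take 7 := by
    simpa using PySem.List.slice_natCast_add (xs := s) (j := i) (n := 7)
  rw [hchunk]
  simp only [List.length_drop]
  by_cases h7 : i + 7 ≤ s.length
  · rw [if_pos h7, if_neg (show ¬ (s.length - i < 7) by omega)]
    by_cases hm : ((s.drop i).take 7 = pvForward ∨ (s.drop i).take 7 = pvBackward)
    · rw [if_pos hm, if_pos hm, ih (s.length - (i + 7)) (by omega) (i + 7) (count + 1) rfl,
        List.drop_drop]
      ring
    · rw [if_neg hm, if_neg hm, ih (s.length - (i + 1)) (by omega) (i + 1) count rfl,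
        List.tail_drop]
  · rw [if_neg h7, if_pos (show s.length - i < 7 by omega)]
    simp

-- ===== VERDICT (by name: the statement is the Claim_ definition above) =====
theorem rainbows_spec : Claim_equal_rainbows := by
  intro field _
  unfold Spec_rainbows rainbows rainbows_alt
  rw [rainbowsGo_eq_cnt, altLoop_eq_cnt]
  simp
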